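-- pv_equiv track=rewrite | github.com/kkwellbbetter/NLP_Project1_QA | data_procs.py | filter_w
-- ===== SOURCE A (Python) =====
-- def filter_w(dic,lst,low,high):
--     temp = []
--     for k,v in dic.items():
--         if v>=low and v<=high:
--             temp.append(k)
--     new_list = []
--     for line in lst:
--         words = [w for w in line if w in  temp]
--         new_list.append(' '.join(words))
--     return new_list
-- ===== SOURCE B (Python) =====
-- def filter_w(dic, lst, low, high):
--     # Fused single pass: each output string is built word-by-word with an
--     # accumulator (no temp key list, no filtered sublist, no join).
--     out = []
--     for line in lst:
--         s = ''
--         first = True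
--         for w in line:
--             if w in dic and low <= dic[w] <= high:
--                 s = w if first else s + ' ' + w
--                 first = False
--         out.append(s)
--     return out
-- ===== Notes on version B (the rewrite author's own statement) =====
-- stated objective: simpler
-- what changed: B replaces A's two-stage pipeline (precompute the in-range key list, then filter each line against it and ' '.join) with one fused pass: each output string is built word by word with a string accumulator and a first-word flag, testing each word directly against the original dict; no temp list, no filtered sublist, no join.
import Mathlib
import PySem

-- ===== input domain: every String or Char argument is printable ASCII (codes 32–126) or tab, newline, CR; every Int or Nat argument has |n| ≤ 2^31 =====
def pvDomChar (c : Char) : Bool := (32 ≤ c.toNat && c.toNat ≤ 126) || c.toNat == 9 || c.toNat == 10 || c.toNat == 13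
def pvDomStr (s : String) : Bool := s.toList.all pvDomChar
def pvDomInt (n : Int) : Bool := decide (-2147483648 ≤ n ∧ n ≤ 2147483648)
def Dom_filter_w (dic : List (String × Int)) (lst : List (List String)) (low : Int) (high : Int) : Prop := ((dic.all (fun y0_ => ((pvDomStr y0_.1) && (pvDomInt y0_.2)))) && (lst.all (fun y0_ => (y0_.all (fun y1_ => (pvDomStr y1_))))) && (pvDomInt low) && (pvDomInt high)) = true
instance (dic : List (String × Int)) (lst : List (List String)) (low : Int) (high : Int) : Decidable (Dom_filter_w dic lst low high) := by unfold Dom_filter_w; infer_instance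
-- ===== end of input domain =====

-- B builds each output string in one fused pass with a string accumulator (no temp key list, no filtered sublist, no join); objective: simpler.


-- ===== PORT A =====
def filter_w (dic : List (String × Int)) (lst : List (List String)) (low : Int) (high : Int) : List String :=
  let temp := dic.foldl (fun t p => if p.2 ≥ low ∧ p.2 ≤ high then t ++ [p.1] else t) []
  lst.foldl (fun nl line => nl ++ [PySem.Str.join " " (line.filter (fun w => temp.contains w))]) []

-- ===== PORT B =====
-- 'w in dic and low <= dic[w] <= high' of Source B (first-match dict lookup)
def pvKeep (dic : List (String × Int)) (low high : Int) (w : String) : Bool :=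
  match dic.lookup w with
  | some v => decide (low ≤ v ∧ v ≤ high)
  | none => false

-- string concatenation is ported over code points (List Char: exact)
def filter_w_alt (dic : List (String × Int)) (lst : List (List String)) (low : Int) (high : Int) : List String :=
  lst.foldl (fun out line =>
    let sf := line.foldl (fun (sf : List Char × Bool) w =>
        if pvKeep dic low high w then
          (if sf.2 then w.toList else sf.1 ++ ' ' :: w.toList, false)
        else sf)
      ([], true)
    out ++ [String.ofList sf.1]) []

-- ===== PRECONDITION & SPEC =====
-- Pre_ only states that dic is the items list of a well-formed Python dict (pairwise-distinct keys);
-- every actual Python dict satisfies it, so no input A accepts is excluded.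
def Pre_filter_w (dic : List (String × Int)) (_lst : List (List String)) (_low : Int) (_high : Int) : Prop :=
  (dic.map Prod.fst).Nodup
instance (dic : List (String × Int)) (lst : List (List String)) (low : Int) (high : Int) : Decidable (Pre_filter_w dic lst low high) := by unfold Pre_filter_w; infer_instance
def pvWitness_filter_w : (List (String × Int)) × List (List String) × Int × Int :=
  ([("a", 1), ("b", 5)], [["a", "b", "c"], ["b"]], 0, 2)

def Spec_filter_w (dic : List (String × Int)) (lst : List (List String)) (low : Int) (high : Int) (out : List String) : Prop := out = filter_w_alt dic lst low high
instance (dic : List (String × Int)) (lst : List (List String)) (low : Int) (high : Int) (out : List String) : Decidable (Spec_filter_w dic lst low high out) := by unfold Spec_filter_w; infer_instance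

-- ===== CLAIM =====
def Claim_equal_filter_w : Prop := ∀ (dic : List (String × Int)) (lst : List (List String)) (low : Int) (high : Int), Dom_filter_w dic lst low high → Pre_filter_w dic lst low high → Spec_filter_w dic lst low high (filter_w dic lst low high)

-- ===== LEMMAS AND PROOFS =====

-- Under unique keys, membership in A's filtered key list equals B's direct lookup test.
theorem filterw_key (low high : Int) (dic : List (String × Int)) (w : String)
    (h : (dic.map Prod.fst).Nodup) :
    (((dic.filter (fun p => decide (p.2 ≥ low ∧ p.2 ≤ high))).map Prod.fst).contains w)
      = pvKeep dic low high w := by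
  unfold pvKeep
  induction dic with
  | nil => simp
  | cons p rest ih =>
    obtain ⟨k, v⟩ := p
    simp only [List.map_cons, List.nodup_cons] at h
    have h2 := ih h.2
    by_cases hw : w = k
    · subst hw
      by_cases hv : v ≥ low ∧ v ≤ high
      · simp [hv.1, hv.2]
      · simp [hv]
        intro x hx _
        exact absurd (List.mem_map.mpr ⟨(w, x), hx, rfl⟩) h.1
    · have hbe : (w == k) = false := by simp [hw]
      by_cases hv : v ≥ low ∧ v ≤ high
      · simpa [List.filter_cons, List.lookup_cons, hv, hbe] using h2
      · simpa [List.filter_cons, List.lookup_cons, hv, hbe] using h2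

-- join with a single-char separator as a flatMap over the tail
theorem join_char_eq (w : String) (ws : List String) :
    PySem.Chars.join [' '] ((w :: ws).map String.toList)
      = w.toList ++ ws.flatMap (fun u => ' ' :: u.toList) := by
  induction ws generalizing w with
  | nil => simp [PySem.Chars.join, List.intercalate]
  | cons u us ih =>
    simp only [List.map_cons, List.flatMap_cons] at *
    simp [PySem.Chars.join, List.intercalate, List.intersperse] at ih ⊢
    simp [ih u]

-- the inner fold, once a first word is placed
theorem foldB_false (p : String → Bool) (l : List String) (s : List Char) :
    l.foldl (fun (sf : List Char × Bool) w =>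
        if p w then (if sf.2 then w.toList else sf.1 ++ ' ' :: w.toList, false) else sf)
      (s, false)
    = (s ++ (l.filter p).flatMap (fun u => ' ' :: u.toList), false) := by
  induction l generalizing s with
  | nil => simp
  | cons w l ih =>
    by_cases hw : p w = true
    · simp [List.foldl_cons, hw, ih]
    · simp [List.foldl_cons, hw, ih]

-- the inner fold from the initial state computes exactly ' '.join of the kept words
theorem foldB_join (p : String → Bool) (l : List String) :
    (l.foldl (fun (sf : List Char × Bool) w =>
        if p w then (if sf.2 then w.toList else sf.1 ++ ' ' :: w.toList, false) else sf)
      ([], true)).1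
    = PySem.Chars.join [' '] ((l.filter p).map String.toList) := by
  induction l with
  | nil => simp [PySem.Chars.join, List.intercalate]
  | cons w l ih =>
    by_cases hw : p w = true
    · simp only [List.foldl_cons, hw, if_true, List.filter_cons_of_pos hw]
      rw [join_char_eq, foldB_false]
    · simpa [List.foldl_cons, hw, List.filter_cons_of_neg] using ih

-- ===== VERDICT =====
theorem filter_w_spec : Claim_equal_filter_w := by
  intro dic lst low high _ hpre
  unfold Spec_filter_w filter_w filter_w_alt
  rw [PySem.List.foldl_append_singleton_eq_map, PySem.List.foldl_append_singleton_eq_map,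
    List.nil_append, List.nil_append]
  apply List.map_congr_left
  intro line _
  rw [foldB_join]
  have hfilter : line.filter (fun w =>
      (dic.foldl (fun t p => if p.2 ≥ low ∧ p.2 ≤ high then t ++ [p.1] else t) []).contains w)
      = line.filter (pvKeep dic low high) := by
    apply List.filter_congr
    intro w _
    rw [PySem.List.foldl_append_ite (p := fun p => p.2 ≥ low ∧ p.2 ≤ high) (f := Prod.fst)]
    simpa using filterw_key low high dic w hpre
  rw [hfilter]
  simp [PySem.Str.join]
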